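-- pv_equiv track=rewrite | github.com/punkryn/ryu_algo | 야구.py | hit
-- ===== SOURCE A (Python) =====
-- def hit(state, k, q):
--     cnt = 0
--     for i in range(3, -1, -1):
--         if state[i] == -1: continue
--         if i + k > 3:
--             q[state[i]] = 1
--             state[i] = -1
--             cnt += 1
--         else:
--             state[i + k] = state[i]
--             state[i] = -1
--     return cnt
-- ===== SOURCE B (Python) =====
-- def hit(state, k, q):
--     # The score is a threshold count: a runner on base i scores iff i >= 4 - k.
--     # Mark the scorers from the suffix [max(0,4-k), 4), count them with one sum,
--     # then rebuild the diamond from scratch for the survivors via a dict.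
--     lo = max(0, 4 - k)
--     for i in range(lo, 4):
--         if state[i] != -1:
--             q[state[i]] = 1
--     cnt = sum(1 for i in range(lo, 4) if state[i] != -1)
--     moved = {i + k: state[i] for i in range(min(lo, 4)) if state[i] != -1}
--     for i in range(4):
--         state[i] = moved.get(i, -1)
--     return cnt
-- ===== Notes on version B (the rewrite author's own statement) =====
-- stated objective: alternative
-- what changed: B replaces A's descending in-place branch loop with a threshold decomposition: scorers are exactly the occupied bases in the suffix [max(0,4-k),4), counted by one range sum, and the surviving runners are rebuilt onto a fresh diamond via a destination dict instead of order-sensitive in-place shifts.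
import Mathlib
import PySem

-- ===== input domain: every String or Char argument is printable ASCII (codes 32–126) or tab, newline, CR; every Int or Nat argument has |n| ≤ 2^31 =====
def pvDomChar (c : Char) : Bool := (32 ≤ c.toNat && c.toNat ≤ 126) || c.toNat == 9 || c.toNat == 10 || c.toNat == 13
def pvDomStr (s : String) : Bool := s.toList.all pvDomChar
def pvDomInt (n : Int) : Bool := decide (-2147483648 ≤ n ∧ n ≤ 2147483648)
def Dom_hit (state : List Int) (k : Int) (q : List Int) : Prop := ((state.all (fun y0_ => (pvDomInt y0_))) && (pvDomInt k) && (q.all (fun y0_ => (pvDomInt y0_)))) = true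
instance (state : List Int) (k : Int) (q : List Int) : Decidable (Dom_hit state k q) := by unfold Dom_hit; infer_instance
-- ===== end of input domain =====

-- A mutates `state` and `q` in place; the equivalence proved here is about the RETURN
-- value (the score count) only — for k ≤ 0 the two programs leave `state` differently.
-- B's objective: an alternative threshold/rebuild decomposition instead of A's
-- order-sensitive descending in-place shift loop.

-- ===== PORT A =====
-- loop body of A: the loop state is the triple (state, q, cnt)
def hitStepA (k : Int) (s : List Int × List Int × Int) (i : Int) : List Int × List Int × Int :=
  if PySem.List.pyGetD s.1 i 0 = -1 then s
  else if i + k > 3 then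
    (PySem.List.pySetD s.1 i (-1), PySem.List.pySetD s.2.1 (PySem.List.pyGetD s.1 i 0) 1, s.2.2 + 1)
  else
    (PySem.List.pySetD (PySem.List.pySetD s.1 (i + k) (PySem.List.pyGetD s.1 i 0)) i (-1), s.2.1, s.2.2)

def hit (state : List Int) (k : Int) (q : List Int) : Int :=
  ((PySem.List.pyRange 3 (-1) (-1)).foldl (hitStepA k) (state, q, 0)).2.2

-- ===== PORT B =====
def hit_alt (state : List Int) (k : Int) (q : List Int) : Int :=
  let lo : Int := max 0 (4 - k)
  -- q writes for the scorers (side effect; does not touch `state`)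
  let _q' := (PySem.List.pyRange lo 4 1).foldl
    (fun qa i => if PySem.List.pyGetD state i 0 ≠ -1 then
        PySem.List.pySetD qa (PySem.List.pyGetD state i 0) 1 else qa) q
  let cnt := (PySem.List.pyRange lo 4 1).foldl
    (fun c i => if PySem.List.pyGetD state i 0 ≠ -1 then c + 1 else c) (0 : Int)
  -- rebuild of the diamond (side effect on `state`; does not affect the return)
  let moved := (PySem.List.pyRange 0 (min lo 4) 1).foldl
    (fun (d : PySem.Dict Int Int) i => if PySem.List.pyGetD state i 0 ≠ -1 then
        d.insert (i + k) (PySem.List.pyGetD state i 0) else d) PySem.Dict.empty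
  let _state' := (PySem.List.pyRange 0 4 1).foldl
    (fun st i => PySem.List.pySetD st i (moved.getD i (-1))) state
  cnt

-- ===== PRECONDITION & SPEC =====
-- Pre_hit is exactly where the Python A returns: state has the four bases (else the
-- read state[3] raises IndexError); either k ≥ -len(state) or no base is occupied
-- (else the write state[i+k] raises IndexError); and every scoring runner's number is
-- a valid (possibly negative) index into q (else q[state[i]] raises IndexError).
def Pre_hit (state : List Int) (k : Int) (q : List Int) : Prop :=
  4 ≤ state.length ∧
  (-(state.length : Int) ≤ k ∨ ∀ i ∈ ([0, 1, 2, 3] : List Nat), state.getD i 0 = -1) ∧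
  (∀ i ∈ ([0, 1, 2, 3] : List Nat), state.getD i 0 ≠ -1 → (i : Int) + k > 3 →
    -(q.length : Int) ≤ state.getD i 0 ∧ state.getD i 0 < q.length)
instance (state : List Int) (k : Int) (q : List Int) : Decidable (Pre_hit state k q) := by
  unfold Pre_hit; infer_instance
def pvWitness_hit : List Int × Int × List Int := ([0, -1, -1, 1], 2, [0, 0])
def Spec_hit (state : List Int) (k : Int) (q : List Int) (out : Int) : Prop := out = hit_alt state k q
instance (state : List Int) (k : Int) (q : List Int) (out : Int) : Decidable (Spec_hit state k q out) := by unfold Spec_hit; infer_instance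

-- ===== CLAIM (what is proved, stated in full; the proofs are below) =====
def Claim_equal_hit : Prop := ∀ (state : List Int) (k : Int) (q : List Int), Dom_hit state k q → Pre_hit state k q → Spec_hit state k q (hit state k q)

-- ===== LEMMAS AND PROOFS =====

lemma getD_setD_lt (st : List Int) (i j v : Int) (h0 : 0 ≤ i) (h : i < j) :
    PySem.List.pyGetD (PySem.List.pySetD st j v) i 0 = PySem.List.pyGetD st i 0 := by
  rw [PySem.List.pySetD_of_nonneg _ _ (by omega : (0:Int) ≤ j),
      PySem.List.pyGetD_of_nonneg _ _ h0, PySem.List.pyGetD_of_nonneg _ _ h0]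
  have : i.toNat ≠ j.toNat := by omega
  rw [List.getD, List.getD, List.getElem?_set_ne (Ne.symm this)]

-- A's count over a descending index list reduces to a pure fold over the original state
lemma foldA (k : Int) (hk : 1 ≤ k) (orig : List Int) :
    ∀ (l : List Int) (st q : List Int) (c : Int),
      (∀ i ∈ l, PySem.List.pyGetD st i 0 = PySem.List.pyGetD orig i 0) →
      (∀ i ∈ l, 0 ≤ i) → l.Pairwise (· > ·) →
      ((l.foldl (hitStepA k) (st, q, c)).2.2 =
        l.foldl (fun acc i => if PySem.List.pyGetD orig i 0 ≠ -1 ∧ i + k > 3 then acc + 1 else acc) c) := by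
  intro l
  induction l with
  | nil => intro st q c _ _ _; rfl
  | cons i t ih =>
    intro st q c hagree hpos hpw
    have hi : PySem.List.pyGetD st i 0 = PySem.List.pyGetD orig i 0 := hagree i (by simp)
    have hi0 : 0 ≤ i := hpos i (by simp)
    have hlt : ∀ j ∈ t, j < i := by
      intro j hj; exact (List.pairwise_cons.mp hpw).1 j hj
    simp only [List.foldl_cons, hitStepA, hi]
    by_cases hv : PySem.List.pyGetD orig i 0 = -1
    · rw [if_pos hv, if_neg (by simp [hv])]
      exact ih st q c (fun j hj => hagree j (by simp [hj])) (fun j hj => hpos j (by simp [hj]))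
        (List.pairwise_cons.mp hpw).2
    · simp only [if_neg hv]
      by_cases hc : i + k > 3
      · rw [if_pos hc, if_pos (by exact ⟨hv, hc⟩)]
        rw [ih _ _ _ (fun j hj => by
              rw [getD_setD_lt _ _ _ _ (hpos j (by simp [hj])) (hlt j hj)]
              exact hagree j (by simp [hj]))
            (fun j hj => hpos j (by simp [hj])) (List.pairwise_cons.mp hpw).2]
      · rw [if_neg hc, if_neg (by omega)]
        rw [ih _ _ _ (fun j hj => by
              have hj0 := hpos j (by simp [hj])
              have hji := hlt j hj
              rw [getD_setD_lt _ _ _ _ hj0 hji, getD_setD_lt _ _ _ _ hj0 (by omega)]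
              exact hagree j (by simp [hj]))
            (fun j hj => hpos j (by simp [hj])) (List.pairwise_cons.mp hpw).2]

lemma foldA0 (k : Int) :
    ∀ (l : List Int) (st q : List Int) (c : Int),
      (∀ i ∈ l, i + k ≤ 3) → ((l.foldl (hitStepA k) (st, q, c)).2.2 = c) := by
  intro l
  induction l with
  | nil => intro st q c _; rfl
  | cons i t ih =>
    intro st q c hle
    have hi : ¬ (i + k > 3) := by have := hle i (by simp); omega
    simp only [List.foldl_cons, hitStepA, if_neg hi]
    by_cases hv : PySem.List.pyGetD st i 0 = -1
    · simp only [if_pos hv]; exact ih _ _ _ (fun j hj => hle j (by simp [hj]))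
    · simp only [if_neg hv]; exact ih _ _ _ (fun j hj => hle j (by simp [hj]))

-- B's return value is just its counting fold
lemma hit_alt_eq_cnt (state : List Int) (k : Int) (q : List Int) :
    hit_alt state k q = (PySem.List.pyRange (max 0 (4 - k)) 4 1).foldl
      (fun c i => if PySem.List.pyGetD state i 0 ≠ -1 then c + 1 else c) (0 : Int) := rfl

-- ===== VERDICT (by name: the statement is the Claim_ definition above) =====
set_option maxHeartbeats 1000000 in
theorem hit_spec : Claim_equal_hit := by
  intro state k q _ _
  unfold Spec_hit hit
  rw [hit_alt_eq_cnt]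
  have hrange : PySem.List.pyRange 3 (-1) (-1) = ([3, 2, 1, 0] : List Int) := by decide
  rw [hrange]
  by_cases hk : k ≤ 0
  · rw [foldA0 k _ _ _ _ (by intro i hi; simp at hi; rcases hi with h | h | h | h <;> omega)]
    rw [PySem.List.pyRange_one_eq_nil (by omega : (4:Int) ≤ max 0 (4 - k))]
    rfl
  · rw [foldA k (by omega) state _ _ _ _ (fun i _ => rfl)
        (by intro i hi; simp at hi; rcases hi with h | h | h | h <;> omega)
        (by decide)]
    rcases (by omega : k = 1 ∨ k = 2 ∨ k = 3 ∨ 4 ≤ k) with h | h | h | h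
    · subst h
      rw [show max 0 (4 - (1:Int)) = 3 from by decide,
          show PySem.List.pyRange 3 4 1 = ([3] : List Int) from by decide]
      simp only [List.foldl_cons, List.foldl_nil]
      split_ifs <;> omega
    · subst h
      rw [show max 0 (4 - (2:Int)) = 2 from by decide,
          show PySem.List.pyRange 2 4 1 = ([2, 3] : List Int) from by decide]
      simp only [List.foldl_cons, List.foldl_nil]
      split_ifs <;> omega
    · subst h
      rw [show max 0 (4 - (3:Int)) = 1 from by decide,
          show PySem.List.pyRange 1 4 1 = ([1, 2, 3] : List Int) from by decide]
      simp only [List.foldl_cons, List.foldl_nil]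
      split_ifs <;> omega
    · rw [show max 0 (4 - k) = 0 from by omega,
          show PySem.List.pyRange 0 4 1 = ([0, 1, 2, 3] : List Int) from by decide]
      simp only [List.foldl_cons, List.foldl_nil]
      split_ifs <;> omega
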